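-- pv_equiv track=rewrite | github.com/gcomneno/crystal-codec-gcc-v1 | src/gcc_v1/cluster.py | encode_cluster_vector
-- ===== SOURCE A (Python) =====
-- from typing import Any, Mapping, Sequence
--
-- def encode_cluster_vector(cluster_vector: Sequence[int]) -> int:
--     """Codifica (S0, S1, ..., Sn) in un intero code_n.
--
--     Convenzioni:
--     - S0 occupa 1 bit (MSB),
--     - ogni Sk (k >= 1) occupa 2 bit.
--     Totale bit = 1 + 2n se la lunghezza è (n + 1).
--     """
--     if not cluster_vector:
--         return 0
--
--     n = len(cluster_vector) - 1
--     s0 = cluster_vector[0] & 1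
--     code = s0 << (2 * n)
--
--     for k in range(1, len(cluster_vector)):
--         sk = cluster_vector[k] & 3
--         shift = 2 * (n - k)
--         code |= sk << shift
--
--     return code
-- ===== SOURCE B (Python) =====
-- def encode_cluster_vector(cluster_vector):
--     """Horner-style fold: no length, no per-element shift offsets."""
--     it = iter(cluster_vector)
--     try:
--         first = next(it)
--     except StopIteration:
--         return 0
--     code = first & 1
--     for s in it:
--         code = (code << 2) | (s & 3)
--     return code
-- ===== Notes on version B (the rewrite author's own statement) =====
-- stated objective: simpler
-- what changed: Replaces the length/absolute-bit-offset placement (code |= sk << 2*(n-k)) by a Horner-style left-to-right fold code = (code << 2) | (s & 3) over an iterator, never computing the length or any shift offset.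
import Mathlib
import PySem

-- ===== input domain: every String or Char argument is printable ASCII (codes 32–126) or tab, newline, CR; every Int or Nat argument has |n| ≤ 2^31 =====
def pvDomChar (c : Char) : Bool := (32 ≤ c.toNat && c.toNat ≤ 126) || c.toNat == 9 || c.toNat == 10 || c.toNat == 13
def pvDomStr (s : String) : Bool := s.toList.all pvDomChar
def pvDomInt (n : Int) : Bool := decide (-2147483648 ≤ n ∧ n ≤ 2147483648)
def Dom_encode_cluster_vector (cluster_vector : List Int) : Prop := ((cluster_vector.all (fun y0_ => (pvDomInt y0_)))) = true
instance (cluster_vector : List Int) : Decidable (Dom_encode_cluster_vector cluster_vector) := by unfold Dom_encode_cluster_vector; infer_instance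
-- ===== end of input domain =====

-- B replaces A's per-element absolute bit offsets (code |= sk << 2*(n-k)) by a Horner-style
-- accumulator fold code = (code << 2) | (s & 3); objective: simpler (no length, no offsets).


-- ===== PORT A =====
-- Python shifts `x << e` have e ≥ 0 here (e = 2*n resp. 2*(n-k) with 1 ≤ k ≤ n), so
-- `.toNat` on the Int shift amount is exact.
def encode_cluster_vector (cluster_vector : List Int) : Int :=
  if cluster_vector = [] then 0
  else
    let n : Int := (cluster_vector.length : Int) - 1
    let s0 : Int := PySem.Int.band (PySem.List.pyGetD cluster_vector 0 0) 1
    let code : Int := s0 <<< (2 * n).toNat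
    (PySem.List.pyRange 1 (cluster_vector.length : Int) 1).foldl
      (fun code k =>
        let sk := PySem.Int.band (PySem.List.pyGetD cluster_vector k 0) 3
        let shift := 2 * (n - k)
        PySem.Int.bor code (sk <<< shift.toNat)) code

-- ===== PORT B =====
def encode_cluster_vector_alt (cluster_vector : List Int) : Int :=
  match cluster_vector with
  | [] => 0
  | first :: rest =>
    rest.foldl (fun code s => PySem.Int.bor (code <<< (2:Nat)) (PySem.Int.band s 3))
      (PySem.Int.band first 1)

-- ===== PRECONDITION & SPEC =====
def Spec_encode_cluster_vector (cluster_vector : List Int) (out : Int) : Prop := out = encode_cluster_vector_alt cluster_vector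
instance (cluster_vector : List Int) (out : Int) : Decidable (Spec_encode_cluster_vector cluster_vector out) := by unfold Spec_encode_cluster_vector; infer_instance

-- ===== CLAIM (what is proved, stated in full; the proofs are below) =====
def Claim_equal_encode_cluster_vector : Prop := ∀ (cluster_vector : List Int), Dom_encode_cluster_vector cluster_vector → Spec_encode_cluster_vector cluster_vector (encode_cluster_vector cluster_vector)

-- ===== LEMMAS AND PROOFS =====

/-- Arithmetic reference form both loops are reduced to. -/
def pvHorner (c : Int) (l : List Int) : Int :=
  l.foldl (fun c s => 4 * c + PySem.Int.band s 3) c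

/-- A's loop with the index bookkeeping stripped: each element is OR-ed in
shifted by twice the number of elements still to come. -/
def pvShiftAcc (c : Int) : List Int → Int
  | [] => c
  | s :: t => pvShiftAcc (PySem.Int.bor c ((PySem.Int.band s 3) <<< (2 * t.length))) t

theorem pv_band3_bounds (s : Int) : 0 ≤ PySem.Int.band s 3 ∧ PySem.Int.band s 3 < 4 := by
  unfold PySem.Int.band
  split_ifs with h1 h2 h2
  · have := Nat.and_le_right (n := s.toNat) (m := 3)
    constructor <;> [positivity; exact_mod_cast Nat.lt_succ_of_le this]
  · omega
  · have h3 : (3:Int).toNat = 3 := rfl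
    have := Nat.sub_le 3 ((3:Int).toNat &&& (-s - 1).toNat)
    constructor <;> [positivity; omega]
  · omega

theorem pv_band1_nonneg (s : Int) : 0 ≤ PySem.Int.band s 1 := by
  rw [PySem.Int.band_one]; exact PySem.Int.mod_nonneg s (by norm_num)

theorem pv_bor_disjoint (a b : Int) (m : Nat) (ha : 0 ≤ a) (hb : 0 ≤ b) (hlt : b < 4) :
    PySem.Int.bor (a * 4 ^ (m + 1)) (b * 4 ^ m) = (4 * a + b) * 4 ^ m := by
  obtain ⟨p, rfl⟩ := Int.eq_ofNat_of_zero_le ha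
  obtain ⟨q, rfl⟩ := Int.eq_ofNat_of_zero_le hb
  have hq : q < 4 := by exact_mod_cast hlt
  have key : p * 4 ^ (m + 1) ||| q * 4 ^ m = (4 * p + q) * 4 ^ m := by
    have e1 : (4 : Nat) ^ (m + 1) = 2 ^ (2 * m + 2) := by
      rw [show (4:Nat) = 2 ^ 2 from rfl, ← pow_mul]; ring_nf
    have e2 : (4 : Nat) ^ m = 2 ^ (2 * m) := by
      rw [show (4:Nat) = 2 ^ 2 from rfl, ← pow_mul]
    have hr : q * 4 ^ m < 2 ^ (2 * m + 2) := by
      rw [← e1]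
      calc q * 4 ^ m < 4 * 4 ^ m := by
            exact Nat.mul_lt_mul_of_pos_right hq (Nat.pow_pos (by norm_num))
        _ = 4 ^ (m + 1) := by ring
    calc p * 4 ^ (m + 1) ||| q * 4 ^ m
        = p <<< (2 * m + 2) ||| q * 4 ^ m := by rw [Nat.shiftLeft_eq, e1]
      _ = p <<< (2 * m + 2) + q * 4 ^ m := (Nat.shiftLeft_add_eq_or_of_lt hr p).symm
      _ = (4 * p + q) * 4 ^ m := by rw [Nat.shiftLeft_eq, ← e1]; ring
  rw [show ((p : Int) * 4 ^ (m + 1)) = ((p * 4 ^ (m + 1) : Nat) : Int) by push_cast; ring,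
      show ((q : Int) * 4 ^ m) = ((q * 4 ^ m : Nat) : Int) by push_cast; ring,
      PySem.Int.bor_natCast, key]
  push_cast; ring

theorem pv_alt_loop (l : List Int) (c : Int) (hc : 0 ≤ c) :
    l.foldl (fun code s => PySem.Int.bor (code <<< (2:Nat)) (PySem.Int.band s 3)) c = pvHorner c l := by
  induction l generalizing c with
  | nil => rfl
  | cons s t ih =>
    have hb := pv_band3_bounds s
    have step : PySem.Int.bor (c <<< (2:Nat)) (PySem.Int.band s 3) = 4 * c + PySem.Int.band s 3 := by
      have h4 : c <<< (2:Nat) = c * 4 := by rw [Int.shiftLeft_eq]; norm_num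
      rw [h4]
      simpa using pv_bor_disjoint c (PySem.Int.band s 3) 0 hc hb.1 hb.2
    simp only [List.foldl_cons, step, pvHorner, List.foldl_cons]
    exact ih _ (by omega)

theorem pv_shiftAcc_eq_horner (l : List Int) (c : Int) (hc : 0 ≤ c) :
    pvShiftAcc (c * 4 ^ l.length) l = pvHorner c l := by
  induction l generalizing c with
  | nil => simp [pvShiftAcc, pvHorner]
  | cons s t ih =>
    have hb := pv_band3_bounds s
    have hsh : (PySem.Int.band s 3) <<< (2 * t.length) = PySem.Int.band s 3 * 4 ^ t.length := by
      rw [Int.shiftLeft_eq]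
      congr 1
      rw [show (4:Int) = 2 ^ 2 from rfl, ← pow_mul]
    simp only [pvShiftAcc, List.length_cons, hsh]
    rw [pv_bor_disjoint c (PySem.Int.band s 3) t.length hc hb.1 hb.2]
    exact ih _ (by omega)

theorem pv_bridge (cv : List Int) (rest : List Int) : ∀ (pre : List Int) (code : Int),
    cv = pre ++ rest →
    (PySem.List.pyRange (pre.length : Int) (cv.length : Int) 1).foldl
      (fun code k =>
        PySem.Int.bor code
          ((PySem.Int.band (PySem.List.pyGetD cv k 0) 3) <<< (2 * ((cv.length : Int) - 1 - k)).toNat))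
      code
    = pvShiftAcc code rest := by
  induction rest with
  | nil =>
    intro pre code h
    have : cv.length = pre.length := by simp [h]
    rw [this, PySem.List.pyRange_one_eq_nil (le_refl _)]
    rfl
  | cons s t ih =>
    intro pre code h
    have hlen : cv.length = pre.length + t.length + 1 := by simp [h]; omega
    have hlt : (pre.length : Int) < (cv.length : Int) := by exact_mod_cast by omega
    rw [PySem.List.pyRange_one_cons hlt, List.foldl_cons]
    have hget : PySem.List.pyGetD cv (pre.length : Int) 0 = s := by
      subst h
      rw [PySem.List.pyGetD_natCast]
      simp [List.getD]
    have hsh : (2 * ((cv.length : Int) - 1 - (pre.length : Int))).toNat = 2 * t.length := by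
      omega
    have := ih (pre ++ [s]) (PySem.Int.bor code ((PySem.Int.band s 3) <<< (2 * t.length)))
      (by simp [h])
    rw [hget, hsh, show ((pre.length : Int) + 1) = ((pre ++ [s]).length : Int) by simp,
      pvShiftAcc] at *
    exact this

-- ===== VERDICT (by name: the statement is the Claim_ definition above) =====
theorem encode_cluster_vector_spec : Claim_equal_encode_cluster_vector := by
  intro cv _
  unfold Spec_encode_cluster_vector
  match cv with
  | [] => rfl
  | x :: rest =>
    have hx := pv_band1_nonneg x
    unfold encode_cluster_vector
    rw [if_neg (List.cons_ne_nil x rest)]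
    show (PySem.List.pyRange ((([x] : List Int).length : Nat) : Int) (((x :: rest).length : Int)) 1).foldl
        (fun code k =>
          PySem.Int.bor code
            ((PySem.Int.band (PySem.List.pyGetD (x :: rest) k 0) 3) <<<
              (2 * (((x :: rest).length : Int) - 1 - k)).toNat))
        ((PySem.Int.band (PySem.List.pyGetD (x :: rest) 0 0) 1) <<<
          (2 * (((x :: rest).length : Int) - 1)).toNat)
      = encode_cluster_vector_alt (x :: rest)
    rw [pv_bridge (x :: rest) rest [x] _ (by simp)]
    rw [PySem.List.pyGetD_zero_cons]
    have hn : ((2 : Int) * (((x :: rest).length : Int) - 1)).toNat = 2 * rest.length := by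
      simp; omega
    have hinit : (PySem.Int.band x 1) <<< ((2 : Int) * (((x :: rest).length : Int) - 1)).toNat
        = PySem.Int.band x 1 * 4 ^ rest.length := by
      rw [hn, Int.shiftLeft_eq]
      congr 1
      rw [show (4:Int) = 2 ^ 2 from rfl, ← pow_mul]
    rw [hinit, pv_shiftAcc_eq_horner rest _ hx]
    exact (pv_alt_loop rest _ hx).symm
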